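-- pv_equiv track=rewrite | github.com/AshleyChen-tech/dataStructures | practiceQuestions/simple/test5.py | find_kth_longest_substring
-- ===== SOURCE A (Python) =====
-- def find_kth_longest_substring(s, k):
--     max_len_dict = {}
--     cur_char = s[0]
--     cur_length = 1
--
--     for i in range(1, len(s)):
--         if s[i] == cur_char:
--             cur_length += 1
--         else:
--             if cur_char in max_len_dict:
--                 max_len_dict[cur_char] = max(max_len_dict[cur_char], cur_length)
--             else:
--                 max_len_dict[cur_char] = cur_length
--             cur_char = s[i]
--             cur_length = 1
--
--     if cur_char in max_len_dict:
--         max_len_dict[cur_char] = max(max_len_dict[cur_char], cur_length)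
--     else:
--         max_len_dict[cur_char] = cur_length
--
--     lengths = sorted(max_len_dict.values(), reverse=True)
--     if k > len(lengths):
--         return lengths[-1]
--     else:
--         return lengths[k-1]
-- ===== SOURCE B (Python) =====
-- def find_kth_longest_substring(s, k):
--     def max_run(c):
--         best = cur = 0
--         for ch in s:
--             cur = cur + 1 if ch == c else 0
--             if cur > best:
--                 best = cur
--         return best
--
--     lengths = sorted((max_run(c) for c in set(s)), reverse=True)
--     if k > len(lengths):
--         return lengths[-1]
--     else:
--         return lengths[k-1]
-- ===== Notes on version B (the rewrite author's own statement) =====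
-- stated objective: alternative
-- what changed: B computes each distinct character's longest run by an independent streaming max-run scan over the whole string (no dict, no run boundaries), collecting one length per character of set(s), instead of A's single-pass previous-character state machine that flushes run lengths into a dict; Pre_ excludes only inputs where both raise IndexError (empty string, or k so negative the index is out of range).
import Mathlib
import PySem

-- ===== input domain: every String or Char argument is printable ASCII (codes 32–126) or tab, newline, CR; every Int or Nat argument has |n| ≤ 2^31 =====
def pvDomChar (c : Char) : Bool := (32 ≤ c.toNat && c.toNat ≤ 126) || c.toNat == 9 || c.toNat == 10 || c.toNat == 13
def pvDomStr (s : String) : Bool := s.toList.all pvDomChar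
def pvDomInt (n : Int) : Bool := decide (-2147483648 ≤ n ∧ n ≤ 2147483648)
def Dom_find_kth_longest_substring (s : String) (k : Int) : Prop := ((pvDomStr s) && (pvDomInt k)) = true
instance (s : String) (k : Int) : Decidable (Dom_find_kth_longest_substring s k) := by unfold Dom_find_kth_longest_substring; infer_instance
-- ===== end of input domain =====

-- B computes each distinct character's longest run by an independent streaming scan of the
-- whole string (no dict, no run splitting), instead of A's single-pass state machine.

-- ===== PORT A =====
-- the final/run-boundary dict update: if cur_char in d: d[c]=max(d[c],l) else d[c]=l
def aInsertMax (d : PySem.Dict Char Int) (c : Char) (l : Int) : PySem.Dict Char Int :=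
  if d.contains c then d.insert c (max (d.getD c 0) l) else d.insert c l

-- the body of A's for-loop, state (cur_char, cur_length, max_len_dict)
def aStep (st : Char × Int × PySem.Dict Char Int) (x : Char) : Char × Int × PySem.Dict Char Int :=
  if x = st.1 then (st.1, st.2.1 + 1, st.2.2) else (x, 1, aInsertMax st.2.2 st.1 st.2.1)

def find_kth_longest_substring (s : String) (k : Int) : Int :=
  let cs := s.toList
  let st0 : Char × Int × PySem.Dict Char Int := (PySem.List.pyGetD cs 0 ' ', 1, PySem.Dict.empty)
  let st := (PySem.List.pyRange 1 (cs.length : Int) 1).foldl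
      (fun st i => aStep st (PySem.List.pyGetD cs i ' ')) st0
  let d := aInsertMax st.2.2 st.1 st.2.1
  let lengths := PySem.List.sorted d.values (fun x => x) true
  if k > (lengths.length : Int) then PySem.List.pyGetD lengths (-1) 0
  else PySem.List.pyGetD lengths (k - 1) 0

-- ===== PORT B =====
-- body of max_run's for-loop, state (best, cur)
def bStep (c : Char) (p : Int × Int) (ch : Char) : Int × Int :=
  let cur := if ch = c then p.2 + 1 else 0
  (if cur > p.1 then cur else p.1, cur)

-- max_run(c): longest run of c, one streaming scan of s
def bMaxRun (cs : List Char) (c : Char) : Int := (cs.foldl (bStep c) (0, 0)).1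

def find_kth_longest_substring_alt (s : String) (k : Int) : Int :=
  let cs := s.toList
  let lengths := PySem.List.sorted ((PySem.Set.ofList cs).map (bMaxRun cs)) (fun x => x) true
  if k > (lengths.length : Int) then PySem.List.pyGetD lengths (-1) 0
  else PySem.List.pyGetD lengths (k - 1) 0

-- ===== PRECONDITION & SPEC =====
-- Pre_ excludes exactly the inputs where A raises: the empty string (s[0] IndexError) and
-- k ≤ -(number of distinct characters), where lengths[k-1] is out of range (IndexError);
-- B raises IndexError on exactly the same inputs.
def Pre_find_kth_longest_substring (s : String) (k : Int) : Prop :=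
  s.toList ≠ [] ∧ 1 - ((PySem.Set.ofList s.toList).length : Int) ≤ k
instance (s : String) (k : Int) : Decidable (Pre_find_kth_longest_substring s k) := by
  unfold Pre_find_kth_longest_substring; infer_instance

def pvWitness_find_kth_longest_substring : String × Int := ("aabba", 2)

def Spec_find_kth_longest_substring (s : String) (k : Int) (out : Int) : Prop := out = find_kth_longest_substring_alt s k
instance (s : String) (k : Int) (out : Int) : Decidable (Spec_find_kth_longest_substring s k out) := by unfold Spec_find_kth_longest_substring; infer_instance

-- ===== CLAIM (what is proved, stated in full; the proofs are below) =====
def Claim_equal_find_kth_longest_substring : Prop := ∀ (s : String) (k : Int), Dom_find_kth_longest_substring s k → Pre_find_kth_longest_substring s k → Spec_find_kth_longest_substring s k (find_kth_longest_substring s k)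

-- ===== LEMMAS AND PROOFS =====

-- proof-side helpers: A's scan re-expressed as a recursion over maximal runs
def takeRun (c : Char) : List Char → Int × List Char
  | [] => (0, [])
  | x :: xs => if x = c then ((takeRun c xs).1 + 1, (takeRun c xs).2) else (0, x :: xs)

theorem takeRun_len_le (c : Char) (l : List Char) : (takeRun c l).2.length ≤ l.length := by
  induction l with
  | nil => simp [takeRun]
  | cons x xs ih =>
    by_cases h : x = c
    · simp [takeRun, h]
      omega
    · simp [takeRun, h]

def bRuns : List Char → PySem.Dict Char Int → PySem.Dict Char Int
  | [], best => best
  | c :: rest, best =>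
    bRuns (takeRun c rest).2 (best.insert c (max (best.getD c 0) ((takeRun c rest).1 + 1)))
termination_by l _ => l.length
decreasing_by
  simp
  exact takeRun_len_le c rest

theorem takeRun_nonneg (c : Char) (l : List Char) : 0 ≤ (takeRun c l).1 := by
  induction l with
  | nil => simp [takeRun]
  | cons x xs ih =>
    by_cases h : x = c <;> simp [takeRun, h]
    omega

-- aInsertMax is "update to the max", with 0 ≤ l
theorem aInsertMax_eq (d : PySem.Dict Char Int) (c : Char) (l : Int) (hl : 0 ≤ l) :
    aInsertMax d c l = d.insert c (max (d.getD c 0) l) := by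
  unfold aInsertMax
  by_cases h : d.contains c
  · simp [h]
  · rw [if_neg h]
    rw [PySem.Dict.getD_of_not_contains d 0 (by simpa using h)]
    rw [max_eq_right hl]

theorem takeRun_replicate (c : Char) (n : Nat) (r : List Char) (hr : ∀ x ∈ r.head?, x ≠ c) :
    takeRun c (List.replicate n c ++ r) = ((n : Int), r) := by
  induction n with
  | zero =>
    simp
    cases r with
    | nil => simp [takeRun]
    | cons y ys =>
      simp at hr
      simp [takeRun, hr]
  | succ m ih =>
    rw [List.replicate_succ]
    simp only [List.cons_append, takeRun, if_pos, ih]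
    norm_cast

-- the core lemma: A's fold over the remaining characters, then the final flush,
-- equals the run recursion on (the l pending copies of c) ++ rest
theorem dict_eq (rest : List Char) : ∀ (d : PySem.Dict Char Int) (c : Char) (l : Int), 1 ≤ l →
    (let st := rest.foldl aStep (c, l, d); aInsertMax st.2.2 st.1 st.2.1)
      = bRuns (List.replicate l.toNat c ++ rest) d := by
  induction rest with
  | nil =>
    intro d c l hl
    have hrep : List.replicate l.toNat c ++ ([] : List Char)
        = c :: (List.replicate (l.toNat - 1) c ++ []) := by
      rw [List.append_nil, List.append_nil]
      have h1 : l.toNat = (l.toNat - 1) + 1 := by omega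
      conv_lhs => rw [h1, List.replicate_succ]
    rw [hrep, bRuns]
    rw [takeRun_replicate c (l.toNat - 1) [] (by simp)]
    simp only [List.foldl_nil]
    rw [aInsertMax_eq d c l (by omega), bRuns]
    congr 2
    omega
  | cons x xs ih =>
    intro d c l hl
    by_cases hx : x = c
    · subst hx
      simp only [List.foldl_cons, aStep, if_true]
      have := ih d x (l + 1) (by omega)
      simp only at this
      rw [this]
      congr 1
      have : (l + 1).toNat = l.toNat + 1 := by omega
      rw [this, List.replicate_succ']
      simp
    · simp only [List.foldl_cons, aStep, if_neg hx]
      have := ih (aInsertMax d c l) x 1 (by omega)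
      simp only at this
      rw [this]
      have hrep : List.replicate l.toNat c ++ (x :: xs)
          = c :: (List.replicate (l.toNat - 1) c ++ (x :: xs)) := by
        have h1 : l.toNat = (l.toNat - 1) + 1 := by omega
        conv_lhs => rw [h1, List.replicate_succ]
        rfl
      rw [hrep, bRuns]
      rw [takeRun_replicate c (l.toNat - 1) (x :: xs) (by simp [hx])]
      rw [aInsertMax_eq d c l (by omega)]
      congr 2
      omega

-- every character of l is consumed into some run
theorem takeRun_decomp (c : Char) (l : List Char) :
    l = List.replicate (takeRun c l).1.toNat c ++ (takeRun c l).2 := by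
  induction l with
  | nil => simp [takeRun]
  | cons x xs ih =>
    by_cases h : x = c
    · subst h
      simp only [takeRun, if_true]
      have h0 := takeRun_nonneg x xs
      have : ((takeRun x xs).1 + 1).toNat = (takeRun x xs).1.toNat + 1 := by omega
      rw [this, List.replicate_succ]
      simpa using ih
    · simp [takeRun, h]

-- the remainder of takeRun never starts with c
theorem takeRun_head_ne (c : Char) (l : List Char) : ∀ x ∈ (takeRun c l).2.head?, x ≠ c := by
  induction l with
  | nil => simp [takeRun]
  | cons x xs ih =>
    by_cases h : x = c
    · simpa [takeRun, h] using ih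
    · simp [takeRun, h]

theorem mem_keys_bRuns (l : List Char) (d : PySem.Dict Char Int) : ∀ (x : Char),
    x ∈ (bRuns l d).keys ↔ x ∈ d.keys ∨ x ∈ l := by
  induction l, d using bRuns.induct with
  | case1 d => intro x; simp [bRuns]
  | case2 c rest d ih =>
    intro x
    rw [bRuns, ih x]
    have hdec := takeRun_decomp c rest
    constructor
    · rintro (h | h)
      · rw [PySem.Dict.mem_keys_insert] at h
        rcases h with h | h
        · right; simp [h]
        · left; exact h
      · right
        apply List.mem_cons_of_mem
        rw [hdec]
        exact List.mem_append_right _ h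
    · rintro (h | h)
      · left
        rw [PySem.Dict.mem_keys_insert]
        right; exact h
      · rcases List.mem_cons.mp h with h | h
        · left
          rw [PySem.Dict.mem_keys_insert]
          left; exact h
        · rw [hdec] at h
          rcases List.mem_append.mp h with h | h
          · left
            rw [PySem.Dict.mem_keys_insert]
            left; exact List.eq_of_mem_replicate h
          · right; exact h

theorem nodup_keys_bRuns (l : List Char) (d : PySem.Dict Char Int) :
    d.keys.Nodup → (bRuns l d).keys.Nodup := by
  induction l, d using bRuns.induct with
  | case1 d => intro h; simpa [bRuns] using h
  | case2 c rest d ih =>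
    intro h
    rw [bRuns]
    exact ih (PySem.Dict.nodup_keys_insert _ _ _ h)

-- the recorded keys are exactly the distinct characters
theorem keys_bRuns_perm (l : List Char) :
    (bRuns l PySem.Dict.empty).keys.Perm (PySem.Set.ofList l) := by
  rw [List.perm_ext_iff_of_nodup
    (nodup_keys_bRuns l _ (by simp [PySem.Dict.keys_empty])) (PySem.Set.nodup_ofList l)]
  intro x
  rw [mem_keys_bRuns, PySem.Set.mem_ofList]
  simp [PySem.Dict.keys_empty]

-- the if in bStep is a max
theorem bStep_eq_max (c : Char) (p : Int × Int) (ch : Char) :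
    bStep c p ch = (max p.1 (if ch = c then p.2 + 1 else 0), if ch = c then p.2 + 1 else 0) := by
  unfold bStep
  by_cases h : ch = c <;> simp [h, max_def] <;> split <;> omega

-- B's fold components stay nonnegative
theorem bFold_nonneg (c : Char) (l : List Char) : ∀ (b cur : Int), 0 ≤ b → 0 ≤ cur →
    0 ≤ (l.foldl (bStep c) (b, cur)).1 ∧ 0 ≤ (l.foldl (bStep c) (b, cur)).2 := by
  induction l with
  | nil => intro b cur hb hc; simpa using ⟨hb, hc⟩
  | cons x xs ih =>
    intro b cur hb hc
    rw [List.foldl_cons, bStep_eq_max]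
    by_cases h : x = c
    · simp only [h, if_true]
      exact ih _ _ (by omega) (by omega)
    · simp only [if_neg h]
      exact ih _ _ (by omega) (by omega)

-- the best accumulator splits off: fold from (b, cur) = max b (fold from (0, cur))
theorem bFold_shift (c : Char) (l : List Char) : ∀ (b cur : Int), 0 ≤ b → 0 ≤ cur →
    l.foldl (bStep c) (b, cur)
      = (max b (l.foldl (bStep c) (0, cur)).1, (l.foldl (bStep c) (0, cur)).2) := by
  induction l with
  | nil =>
    intro b cur hb hc
    simp only [List.foldl_nil]
    rw [max_eq_left hb]
  | cons x xs ih =>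
    intro b cur hb hc
    simp only [List.foldl_cons, bStep_eq_max]
    by_cases h : x = c
    · simp only [h, if_true]
      rw [ih (max b (cur + 1)) (cur + 1) (by omega) (by omega),
          ih (max 0 (cur + 1)) (cur + 1) (by omega) (by omega)]
      simp only [Prod.mk.injEq]
      exact ⟨by omega, trivial⟩
    · simp only [if_neg h]
      rw [ih (max b 0) 0 (by omega) (by omega), ih (max 0 0) 0 (by omega) (by omega)]
      simp only [Prod.mk.injEq]
      exact ⟨by omega, trivial⟩

theorem bMaxRun_nonneg (cs : List Char) (c : Char) : 0 ≤ bMaxRun cs c :=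
  (bFold_nonneg c cs 0 0 le_rfl le_rfl).1

-- scanning a block of n copies of c
theorem bFold_replicate (c : Char) (n : Nat) : ∀ (cur : Int), 0 ≤ cur →
    (List.replicate n c).foldl (bStep c) (0, cur)
      = (if n = 0 then 0 else cur + n, cur + n) := by
  induction n with
  | zero => intro cur hc; simp
  | succ m ih =>
    intro cur hc
    rw [List.replicate_succ, List.foldl_cons, bStep_eq_max]
    simp only [if_true]
    rw [bFold_shift c _ _ _ (by omega) (by omega), ih (cur + 1) (by omega)]
    simp only [Prod.mk.injEq]
    by_cases hm : m = 0
    · subst hm; simp; omega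
    · simp only [if_neg hm, if_neg (Nat.succ_ne_zero m)]
      refine ⟨by push_cast; omega, by push_cast; omega⟩

-- scanning a block of n copies of some other character resets the state
theorem bFold_replicate_ne (c c' : Char) (h : c ≠ c') (n : Nat) : ∀ (cur : Int),
    (List.replicate n c).foldl (bStep c') (0, cur) = (0, if n = 0 then cur else 0) := by
  induction n with
  | zero => intro cur; simp
  | succ m ih =>
    intro cur
    rw [List.replicate_succ, List.foldl_cons, bStep_eq_max]
    simp only [if_neg h, max_self]
    rw [ih 0]
    cases m with
    | zero => simp
    | succ p => simp

-- starting cur is irrelevant when the next character is not c (or the list ends)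
theorem bFold_fst_reset (c : Char) (rest : List Char) (hr : ∀ x ∈ rest.head?, x ≠ c)
    (cur : Int) :
    (rest.foldl (bStep c) (0, cur)).1 = bMaxRun rest c := by
  cases rest with
  | nil => simp [bMaxRun]
  | cons x xs =>
    simp only [List.head?_cons, Option.mem_some_iff] at hr
    have hx : x ≠ c := hr x rfl
    unfold bMaxRun
    simp only [List.foldl_cons, bStep_eq_max, if_neg hx, max_self]

-- the max-run of c over a leading c-block followed by rest
theorem bMaxRun_repl (c : Char) (n : Nat) (rest : List Char) (hr : ∀ x ∈ rest.head?, x ≠ c) :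
    bMaxRun (List.replicate n c ++ rest) c = max (n : Int) (bMaxRun rest c) := by
  unfold bMaxRun
  rw [List.foldl_append, bFold_replicate c n 0 le_rfl]
  have hblock : ((if n = 0 then (0:Int) else 0 + n), ((0:Int) + n)) = ((n : Int), (n : Int)) := by
    by_cases hn : n = 0 <;> simp [hn]
  rw [hblock]
  rw [bFold_shift c rest (n : Int) (n : Int) (by positivity) (by positivity)]
  dsimp only
  rw [bFold_fst_reset c rest hr]
  rfl

-- a leading block of another character does not affect c's max-run
theorem bMaxRun_repl_ne (c c' : Char) (h : c ≠ c') (n : Nat) (rest : List Char) :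
    bMaxRun (List.replicate n c ++ rest) c' = bMaxRun rest c' := by
  unfold bMaxRun
  rw [List.foldl_append, bFold_replicate_ne c c' h n 0]
  cases n with
  | zero => simp
  | succ m => simp

-- the dict built from the runs holds exactly B's per-character max-run
theorem getD_bRuns (l : List Char) (d : PySem.Dict Char Int) : ∀ (c : Char),
    0 ≤ d.getD c 0 → (bRuns l d).getD c 0 = max (d.getD c 0) (bMaxRun l c) := by
  induction l, d using bRuns.induct with
  | case1 d => intro c h; rw [bRuns]; simp [bMaxRun, max_eq_left h]
  | case2 c0 rest d ih =>
    intro c hc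
    rw [bRuns]
    have hdec : c0 :: rest
        = List.replicate ((takeRun c0 rest).1.toNat + 1) c0 ++ (takeRun c0 rest).2 := by
      conv_lhs => rw [takeRun_decomp c0 rest]
      rw [List.replicate_succ, List.cons_append]
    have htr := takeRun_nonneg c0 rest
    by_cases h : c = c0
    · subst h
      rw [ih c (by rw [PySem.Dict.getD_insert_self]; omega)]
      rw [PySem.Dict.getD_insert_self]
      conv_rhs => rw [hdec]
      rw [bMaxRun_repl c _ _ (takeRun_head_ne c rest)]
      have hcast : (((takeRun c rest).1.toNat + 1 : Nat) : Int) = (takeRun c rest).1 + 1 := by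
        omega
      rw [hcast, max_assoc]
    · rw [ih c (by rw [PySem.Dict.getD_insert, if_neg h]; exact hc)]
      rw [PySem.Dict.getD_insert, if_neg h]
      conv_rhs => rw [hdec]
      rw [bMaxRun_repl_ne c0 c (fun hh => h hh.symm)]

-- descending sort is the reverse of the ascending sort (Int values, identity key)
theorem sorted_rev_eq_reverse (vs : List Int) :
    PySem.List.sorted vs (fun x => x) true = (PySem.List.sorted vs (fun x => x) false).reverse := by
  have h := PySem.List.eq_of_perm_of_pairwise_le_of_injective (fun x : Int => x)
    (fun a b hab => hab)
    (l₁ := (PySem.List.sorted vs (fun x => x) true).reverse)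
    (l₂ := PySem.List.sorted vs (fun x => x) false)
    (((PySem.List.sorted vs (fun x => x) true).reverse_perm.trans
      (PySem.List.sorted_perm vs (fun x => x) true)).trans
      (PySem.List.sorted_perm vs (fun x => x) false).symm)
    (by
      rw [List.pairwise_reverse]
      exact PySem.List.sorted_pairwise_rev vs (fun x => x))
    (PySem.List.sorted_pairwise vs (fun x => x))
  calc PySem.List.sorted vs (fun x => x) true
      = (PySem.List.sorted vs (fun x => x) true).reverse.reverse := by rw [List.reverse_reverse]
    _ = (PySem.List.sorted vs (fun x => x) false).reverse := by rw [h]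

-- descending sorts of rearrangements coincide
theorem sorted_rev_eq_of_perm (l1 l2 : List Int) (h : l1.Perm l2) :
    PySem.List.sorted l1 (fun x => x) true = PySem.List.sorted l2 (fun x => x) true := by
  rw [sorted_rev_eq_reverse, sorted_rev_eq_reverse,
    PySem.List.sorted_eq_sorted_of_perm l1 l2 (fun x => x) (fun a b hab => hab) h]

-- A's dict values are a rearrangement of B's per-character max-runs
theorem values_perm (cs : List Char) :
    (bRuns cs PySem.Dict.empty).values.Perm ((PySem.Set.ofList cs).map (bMaxRun cs)) := by
  have hnd : (bRuns cs PySem.Dict.empty).keys.Nodup :=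
    nodup_keys_bRuns cs _ (by simp [PySem.Dict.keys_empty])
  rw [PySem.Dict.values_eq_map_keys _ hnd 0]
  have hmap : (bRuns cs PySem.Dict.empty).keys.map (fun c => (bRuns cs PySem.Dict.empty).getD c 0)
      = (bRuns cs PySem.Dict.empty).keys.map (bMaxRun cs) := by
    apply List.map_congr_left
    intro c _
    rw [getD_bRuns cs PySem.Dict.empty c (by simp [PySem.Dict.getD_empty])]
    simp [PySem.Dict.getD_empty]
    exact bMaxRun_nonneg cs c
  rw [hmap]
  exact (keys_bRuns_perm cs).map (bMaxRun cs)

-- ===== VERDICT (by name: the statement is the Claim_ definition above) =====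
theorem find_kth_longest_substring_spec : Claim_equal_find_kth_longest_substring := by
  intro s k _hdom hpre
  obtain ⟨hne, _hk⟩ := hpre
  unfold Spec_find_kth_longest_substring
  unfold find_kth_longest_substring find_kth_longest_substring_alt
  obtain ⟨c0, rest, hcs⟩ := List.exists_cons_of_ne_nil hne
  simp only
  rw [PySem.List.foldl_pyRange_pyGetD' s.toList ' ' aStep _ (by omega)]
  -- A's dict equals the run recursion over the whole string
  have hd : (let st := (s.toList.drop (1:Int).toNat).foldl aStep (PySem.List.pyGetD s.toList 0 ' ', 1, PySem.Dict.empty);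
      aInsertMax st.2.2 st.1 st.2.1) = bRuns s.toList PySem.Dict.empty := by
    rw [hcs]
    simp only [Int.toNat_one, List.drop_succ_cons, List.drop_zero,
      PySem.List.pyGetD_zero_cons]
    have := dict_eq rest PySem.Dict.empty c0 1 (le_refl 1)
    simpa using this
  simp only at hd ⊢
  rw [hd]
  rw [sorted_rev_eq_of_perm _ _ (values_perm s.toList)]
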